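-- pv_equiv track=rewrite | github.com/melvinchia3636/legacy-coding-challenges | coding challenge/abacaba.py | abacaba_pattern
-- ===== SOURCE A (Python) =====
-- import string
--
-- def abacaba_pattern(n):
--     letters = string.ascii_uppercase
--     count = 1
--     lst = 'A'
--     while n-1 > 0:
--         lst = lst + letters[count] + lst
--         n-=1
--         count += 1
--     return lst
-- ===== SOURCE B (Python) =====
-- import string
--
-- def abacaba_pattern(n):
--     if n <= 1:
--         return 'A'
--     sub = abacaba_pattern(n - 1)
--     return sub + string.ascii_uppercase[n - 1] + sub
-- ===== Notes on version B (the rewrite author's own statement) =====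
-- stated objective: simpler
-- what changed: Replaces A's outward-wrapping while-loop with counter state by a direct structural recursion on the pattern depth (pattern(n) = pattern(n-1) + letter + pattern(n-1)).
import Mathlib
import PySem

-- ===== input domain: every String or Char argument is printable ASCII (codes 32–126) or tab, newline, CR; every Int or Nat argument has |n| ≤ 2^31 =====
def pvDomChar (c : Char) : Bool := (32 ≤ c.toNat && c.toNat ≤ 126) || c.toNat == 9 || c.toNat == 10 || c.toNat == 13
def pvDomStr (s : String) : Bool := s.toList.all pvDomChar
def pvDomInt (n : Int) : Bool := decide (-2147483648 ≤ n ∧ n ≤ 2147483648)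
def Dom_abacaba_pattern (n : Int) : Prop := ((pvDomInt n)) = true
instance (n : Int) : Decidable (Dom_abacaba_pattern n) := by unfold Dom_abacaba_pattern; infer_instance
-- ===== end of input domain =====

-- B replaces A's outward-wrapping while-loop by a direct structural recursion on the pattern depth (simpler decomposition, same cost).


-- ===== PORT A =====
def pvLetters : List Char := "ABCDEFGHIJKLMNOPQRSTUVWXYZ".toList

-- while n-1 > 0: lst = lst + letters[count] + lst; n -= 1; count += 1
-- (letters[count] out of range = IndexError in Python; excluded by Pre_; the port returns lst there, unreachable under Pre_)
def abacabaLoop (n : Int) (count : Int) (lst : List Char) : List Char :=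
  if _h : n - 1 > 0 then
    match PySem.List.pyGet? pvLetters count with
    | some c => abacabaLoop (n - 1) (count + 1) (lst ++ [c] ++ lst)
    | none => lst
  else lst
termination_by (n - 1).toNat
decreasing_by omega

def abacaba_pattern (n : Int) : String :=
  String.ofList (abacabaLoop n 1 ['A'])

-- ===== PORT B =====
def abacabaRec (n : Int) : List Char :=
  if _h : n ≤ 1 then ['A']
  else
    let sub := abacabaRec (n - 1)
    match PySem.List.pyGet? pvLetters (n - 1) with
    | some c => sub ++ [c] ++ sub
    | none => sub  -- IndexError in Python; unreachable under Pre_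
termination_by n.toNat
decreasing_by omega

def abacaba_pattern_alt (n : Int) : String :=
  String.ofList (abacabaRec n)

-- ===== PRECONDITION & SPEC =====
-- Pre_ excludes n > 26: there A raises IndexError (letters[count] with count ≥ 26), and B raises IndexError identically.
def Pre_abacaba_pattern (n : Int) : Prop := n ≤ 26
instance (n : Int) : Decidable (Pre_abacaba_pattern n) := by unfold Pre_abacaba_pattern; infer_instance
def pvWitness_abacaba_pattern : Int := (5)

def Spec_abacaba_pattern (n : Int) (out : String) : Prop := out = abacaba_pattern_alt n
instance (n : Int) (out : String) : Decidable (Spec_abacaba_pattern n out) := by unfold Spec_abacaba_pattern; infer_instance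

-- ===== CLAIM =====
def Claim_equal_abacaba_pattern : Prop := ∀ (n : Int), Dom_abacaba_pattern n → Pre_abacaba_pattern n → Spec_abacaba_pattern n (abacaba_pattern n)

-- ===== LEMMAS AND PROOFS =====

lemma abacabaRec_base {n : Int} (h : n ≤ 1) : abacabaRec n = ['A'] := by
  rw [abacabaRec]; simp [h]

lemma abacabaRec_step {n : Int} (h1 : ¬ n ≤ 1) {c : Char}
    (hc : PySem.List.pyGet? pvLetters (n - 1) = some c) :
    abacabaRec n = abacabaRec (n - 1) ++ [c] ++ abacabaRec (n - 1) := by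
  rw [abacabaRec]; simp [h1, hc]

lemma pvLetters_get {k : Int} (h0 : 0 ≤ k) (h1 : k < 26) :
    ∃ c, PySem.List.pyGet? pvLetters k = some c := by
  have : PySem.List.pyGet? pvLetters k = pvLetters[k.toNat]? := by
    exact PySem.List.pyGet?_of_nonneg _ h0
  rw [this]
  have hlen : k.toNat < pvLetters.length := by
    have : pvLetters.length = 26 := by decide
    omega
  exact ⟨pvLetters[k.toNat], List.getElem?_eq_getElem hlen⟩

-- Loop invariant: running the loop for m more steps from state (count, pattern count) yields pattern (count + m).
lemma loop_inv : ∀ (m : Nat) (count : Int), 1 ≤ count → count + m ≤ 26 →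
    abacabaLoop (m + 1) count (abacabaRec count) = abacabaRec (count + m) := by
  intro m
  induction m with
  | zero =>
    intro count _ _
    rw [abacabaLoop]
    norm_num
  | succ k ih =>
    intro count h1 h2
    have hc : ∃ c, PySem.List.pyGet? pvLetters count = some c :=
      pvLetters_get (by omega) (by omega)
    obtain ⟨c, hc⟩ := hc
    rw [abacabaLoop]
    push_cast
    have hgt : ((k : Int) + 1 + 1) - 1 > 0 := by omega
    rw [dif_pos hgt, hc]
    have harg : ((k : Int) + 1 + 1) - 1 = (k : Int) + 1 := by ring
    rw [harg]
    have hstep : abacabaRec count ++ [c] ++ abacabaRec count = abacabaRec (count + 1) := by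
      have : PySem.List.pyGet? pvLetters ((count + 1) - 1) = some c := by
        simpa using hc
      rw [abacabaRec_step (by omega) this]
      simp
    show abacabaLoop ((k : Int) + 1) (count + 1) (abacabaRec count ++ [c] ++ abacabaRec count) = _
    rw [hstep]
    have := ih (count + 1) (by omega) (by push_cast at h2 ⊢; omega)
    rw [this]
    ring_nf

-- ===== VERDICT =====
theorem abacaba_pattern_spec : Claim_equal_abacaba_pattern := by
  unfold Claim_equal_abacaba_pattern Spec_abacaba_pattern Pre_abacaba_pattern
  intro n _ hpre
  unfold abacaba_pattern abacaba_pattern_alt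
  by_cases h : n ≤ 1
  · rw [abacabaRec_base h, abacabaLoop]
    have hng : ¬ (n - 1 > 0) := by omega
    rw [dif_neg hng]
  · have hm : ∃ m : Nat, n = (m : Int) + 2 := ⟨(n - 2).toNat, by omega⟩
    obtain ⟨m, rfl⟩ := hm
    have h1 : abacabaRec (1 : Int) = ['A'] := abacabaRec_base (by norm_num)
    have := loop_inv (m + 1) 1 (by norm_num) (by push_cast; omega)
    rw [h1] at this
    push_cast at this
    have harg1 : ((m : Int) + 1 + 1) = (m : Int) + 2 := by ring
    have harg2 : (1 : Int) + ((m : Int) + 1) = (m : Int) + 2 := by ring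
    rw [harg1, harg2] at this
    rw [this]
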